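-- pv_equiv track=rewrite | github.com/lmeninato/data_challenge | src/write_data.py | get_monthly_averages
-- ===== SOURCE A (Python) =====
-- def get_month_difference(x, y):
--     """
--     Return number of months between year-month combinations.
--     :param x: tuple (year, month)
--     :param y: tuple (year, month)
--     :return: integer
--     """
--     return abs((x[0]-y[0])*12 + x[1] - y[1])
--
-- def get_monthly_averages(ordered_dict):
--     """
--     Takes advantage of the hashing the (year, month, border, measure) -> key-value pairs.
--     We also have to keep track of the previous total for a given key, and the first occurrence of a key.
--     Then the formula: average = (previous total)/(month distance) yields
--     the rolling average monthly number of crossings.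
--     :param ordered_dict: (year, month, border, measure) -> value
--     key[0] : Year
--     key[1] : Month
--     key[2] : Border
--     key[3] : Measure
--     :return: list of averages
--     """
--     border_measures = {}
--     averages = []
--     for key in reversed(ordered_dict):
--         temp_key = (key[2], key[3])  # (Border, Measure) tuple
--         current_value = ordered_dict[key]
--         if temp_key not in border_measures:
--             border_measures[temp_key] = {"year-month": (key[0], key[1]), "prev_total": current_value}
--             averages.append(0)
--         else:
--             current_month = (key[0], key[1])
--             first_month = border_measures[temp_key]["year-month"]
--             prev_total = border_measures[temp_key]["prev_total"]
--             month_diff = get_month_difference(first_month, current_month)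
--             averages.append(-(-prev_total//month_diff))  # round up
--             border_measures[temp_key]["prev_total"] += current_value
--     return averages
-- ===== SOURCE B (Python) =====
-- def get_month_difference(x, y):
--     return abs((x[0]-y[0])*12 + x[1] - y[1])
--
-- def get_monthly_averages(ordered_dict):
--     # Stateless re-formulation: for each entry of the reversed sequence, its average
--     # is computed directly from the earlier same-(border,measure) entries.
--     items = list(reversed(ordered_dict.items()))
--     out = []
--     for i in range(len(items)):
--         key = items[i][0]
--         prev = [j for j in range(i)
--                 if (items[j][0][2], items[j][0][3]) == (key[2], key[3])]
--         if not prev: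
--             out.append(0)
--         else:
--             first = items[prev[0]][0]
--             total = sum(items[j][1] for j in prev)
--             md = get_month_difference((first[0], first[1]), (key[0], key[1]))
--             out.append(-(-total // md))
--     return out
-- ===== Notes on version B (the rewrite author's own statement) =====
-- stated objective: alternative
-- what changed: A threads a mutable dict of per-(border,measure) running totals through one reversed pass; B is stateless: for each entry of the reversed sequence it recomputes the list of earlier same-(border,measure) entries by an index scan and applies the ceil-division formula to their sum directly, trading A's O(n) accumulator pass for an O(n^2) look-back with no shared state.
import Mathlib
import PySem

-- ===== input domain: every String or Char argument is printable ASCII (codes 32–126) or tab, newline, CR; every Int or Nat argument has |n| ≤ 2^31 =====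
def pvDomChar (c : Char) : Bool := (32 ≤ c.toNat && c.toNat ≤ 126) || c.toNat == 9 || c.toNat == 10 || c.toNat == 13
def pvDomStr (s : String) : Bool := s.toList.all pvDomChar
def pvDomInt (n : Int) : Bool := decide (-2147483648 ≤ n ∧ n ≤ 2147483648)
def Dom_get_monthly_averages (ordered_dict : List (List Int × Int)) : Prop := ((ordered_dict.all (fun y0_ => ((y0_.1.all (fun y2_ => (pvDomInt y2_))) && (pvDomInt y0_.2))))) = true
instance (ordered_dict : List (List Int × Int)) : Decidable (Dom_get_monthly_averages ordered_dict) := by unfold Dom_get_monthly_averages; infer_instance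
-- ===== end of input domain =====

-- B replaces A's stateful dict of running totals by a stateless per-entry formula
-- (each entry looks back at the earlier same-(border,measure) entries of the reversed
-- sequence); alternative decomposition, not faster.

-- ===== PORT A =====
-- shared pure accessors; key[0]..key[3] raise IndexError for len < 4 in Python,
-- which Pre_ excludes, so List.getD is exact on the admitted inputs
def pvMonthDiff (x y : Int × Int) : Int := |(x.1 - y.1) * 12 + x.2 - y.2|
def pvGk (k : List Int) : Int × Int := (k.getD 2 0, k.getD 3 0)
def pvYm (k : List Int) : Int × Int := (k.getD 0 0, k.getD 1 0)

-- loop body of A: state = (border_measures, averages)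
def pvStepA (od : List (List Int × Int))
    (st : PySem.Dict (Int × Int) ((Int × Int) × Int) × List Int)
    (kv : List Int × Int) : PySem.Dict (Int × Int) ((Int × Int) × Int) × List Int :=
  let key := kv.1
  let tk := pvGk key
  -- ordered_dict[key]; under Pre_'s Nodup keys this is the pair's own value (never the default)
  let cv := ((PySem.Dict.mk od).get? key).getD 0
  match st.1.get? tk with
  | none => (st.1.insert tk (pvYm key, cv), st.2 ++ [0])
  | some e =>
      (st.1.insert tk (e.1, e.2 + cv),
       st.2 ++ [-(PySem.Int.floordiv (-e.2) (pvMonthDiff e.1 (pvYm key)))])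

def get_monthly_averages (ordered_dict : List (List Int × Int)) : List Int :=
  ((ordered_dict.reverse).foldl (pvStepA ordered_dict) (PySem.Dict.empty, [])).2

-- ===== PORT B =====
-- one output entry of B: looks back at indices j < i of the reversed item list
def pvEntryB (items : List (List Int × Int)) (i : Nat) : Int :=
  let key := (items.getD i ([], 0)).1
  let prev := (List.range i).filter (fun j => pvGk (items.getD j ([], 0)).1 == pvGk key)
  if prev.isEmpty then 0
  else
    let first := (items.getD (prev.headD 0) ([], 0)).1
    let total := (prev.map (fun j => (items.getD j ([], 0)).2)).sum
    Neg.neg (PySem.Int.floordiv (-total) (pvMonthDiff (pvYm first) (pvYm key)))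

def get_monthly_averages_alt (ordered_dict : List (List Int × Int)) : List Int :=
  let items := ordered_dict.reverse
  (List.range items.length).map (fun i => pvEntryB items i)

-- ===== PRECONDITION & SPEC =====
-- Pre_ excludes: (a) duplicate keys, on which the Python dict collapses entries so the
-- association-list reading of the input is not what A's dict sees; (b) keys of length < 4
-- (IndexError in A); (c) inputs where some entry's year-month distance to the first
-- same-(border,measure) entry of the reversed sequence is zero (ZeroDivisionError in A).
def Pre_get_monthly_averages (ordered_dict : List (List Int × Int)) : Prop :=
  (ordered_dict.map Prod.fst).Nodup ∧
  (∀ kv ∈ ordered_dict, 4 ≤ kv.1.length) ∧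
  (∀ i ∈ List.range ordered_dict.length, ∀ j ∈ List.range ordered_dict.length, i < j →
    pvGk (ordered_dict.reverse.getD i ([], 0)).1 = pvGk (ordered_dict.reverse.getD j ([], 0)).1 →
    (∀ l ∈ List.range i, pvGk (ordered_dict.reverse.getD l ([], 0)).1 ≠ pvGk (ordered_dict.reverse.getD i ([], 0)).1) →
    pvMonthDiff (pvYm (ordered_dict.reverse.getD i ([], 0)).1) (pvYm (ordered_dict.reverse.getD j ([], 0)).1) ≠ 0)

instance (ordered_dict : List (List Int × Int)) : Decidable (Pre_get_monthly_averages ordered_dict) := by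
  unfold Pre_get_monthly_averages; infer_instance

def pvWitness_get_monthly_averages : (List (List Int × Int)) :=
  [([2019, 1, 5, 7], 10), ([2019, 2, 5, 7], 20), ([2019, 2, 9, 7], 4)]

def Spec_get_monthly_averages (ordered_dict : List (List Int × Int)) (out : List Int) : Prop := out = get_monthly_averages_alt ordered_dict
instance (ordered_dict : List (List Int × Int)) (out : List Int) : Decidable (Spec_get_monthly_averages ordered_dict out) := by unfold Spec_get_monthly_averages; infer_instance

-- ===== CLAIM (what is proved, stated in full; the proofs are below) =====
def Claim_equal_get_monthly_averages : Prop := ∀ (ordered_dict : List (List Int × Int)), Dom_get_monthly_averages ordered_dict → Pre_get_monthly_averages ordered_dict → Spec_get_monthly_averages ordered_dict (get_monthly_averages ordered_dict)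

-- ===== LEMMAS AND PROOFS =====

-- the entries before the current one (in reversed order) with the same (border, measure)
def pvPrevs (pref : List (List Int × Int)) (key : List Int) : List (List Int × Int) :=
  pref.filter (fun x => pvGk x.1 == pvGk key)

-- the common specification of one output entry, given the already-processed prefix
def pvEntryOut (pref : List (List Int × Int)) (kv : List Int × Int) : Int :=
  let ms := pvPrevs pref kv.1
  if ms.isEmpty then 0
  else -(PySem.Int.floordiv (-((ms.map Prod.snd).sum))
          (pvMonthDiff (pvYm (ms.headD ([], 0)).1) (pvYm kv.1)))

def pvOuts (pref items : List (List Int × Int)) : List Int :=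
  match items with
  | [] => []
  | kv :: rest => pvEntryOut pref kv :: pvOuts (pref ++ [kv]) rest

-- what A's dict holds for group g after processing pref
def pvExp (pref : List (List Int × Int)) (g : Int × Int) : Option ((Int × Int) × Int) :=
  let ms := pref.filter (fun x => pvGk x.1 == g)
  if ms.isEmpty then none
  else some (pvYm (ms.headD ([], 0)).1, (ms.map Prod.snd).sum)

lemma pvExp_append (pref : List (List Int × Int)) (kv : List Int × Int) (g : Int × Int) :
    pvExp (pref ++ [kv]) g =
      if pvGk kv.1 = g then
        match pvExp pref g with
        | none => some (pvYm kv.1, kv.2)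
        | some e => some (e.1, e.2 + kv.2)
      else pvExp pref g := by
  unfold pvExp
  simp only [List.filter_append, List.filter_cons, List.filter_nil]
  by_cases hg : pvGk kv.1 = g
  · subst hg
    simp only [beq_self_eq_true, if_true]
    cases hms : pref.filter (fun x => pvGk x.1 == pvGk kv.1) with
    | nil => simp
    | cons a t =>
      simp [List.sum_append]
      omega
  · have hb : (pvGk kv.1 == g) = false := by simp [hg]
    simp only [hb, Bool.false_eq_true, if_false, List.append_nil, hg]

lemma pvFoldA (od : List (List Int × Int)) (items : List (List Int × Int))
    (pref : List (List Int × Int)) (d : PySem.Dict (Int × Int) ((Int × Int) × Int))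
    (acc : List Int)
    (hlook : ∀ kv ∈ items, (PySem.Dict.mk od).get? kv.1 = some kv.2)
    (hinv : ∀ g, d.get? g = pvExp pref g) :
    (items.foldl (pvStepA od) (d, acc)).2 = acc ++ pvOuts pref items := by
  induction items generalizing pref d acc with
  | nil => simp [pvOuts]
  | cons kv rest ih =>
    have hcv : (PySem.Dict.mk od).get? kv.1 = some kv.2 := hlook kv (by simp)
    have hlook' : ∀ kv' ∈ rest, (PySem.Dict.mk od).get? kv'.1 = some kv'.2 :=
      fun kv' h => hlook kv' (List.mem_cons_of_mem _ h)
    rw [List.foldl_cons]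
    cases hE : pvExp pref (pvGk kv.1) with
    | none =>
      have hms : (pref.filter (fun x => pvGk x.1 == pvGk kv.1)).isEmpty = true := by
        by_cases h : (pref.filter (fun x => pvGk x.1 == pvGk kv.1)).isEmpty
        · exact h
        · unfold pvExp at hE; simp [h] at hE
      have hstep : pvStepA od (d, acc) kv
          = (d.insert (pvGk kv.1) (pvYm kv.1, kv.2), acc ++ [0]) := by
        simp only [pvStepA]
        rw [hcv, hinv (pvGk kv.1), hE]
        rfl
      have hinv' : ∀ g, (d.insert (pvGk kv.1) (pvYm kv.1, kv.2)).get? g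
          = pvExp (pref ++ [kv]) g := by
        intro g
        rw [PySem.Dict.get?_insert, pvExp_append]
        by_cases hg : g = pvGk kv.1
        · simp [hg, hE]
        · simp [hg, Ne.symm hg, hinv g]
      rw [hstep, ih (pref ++ [kv]) _ _ hlook' hinv']
      have hout : pvEntryOut pref kv = 0 := by
        unfold pvEntryOut pvPrevs
        simp [hms]
      show acc ++ [0] ++ pvOuts (pref ++ [kv]) rest = acc ++ pvOuts pref (kv :: rest)
      rw [show pvOuts pref (kv :: rest) = pvEntryOut pref kv :: pvOuts (pref ++ [kv]) rest
        from rfl, hout, List.append_assoc]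
      rfl
    | some e =>
      have hms : (pref.filter (fun x => pvGk x.1 == pvGk kv.1)).isEmpty = false := by
        by_cases h : (pref.filter (fun x => pvGk x.1 == pvGk kv.1)).isEmpty
        · unfold pvExp at hE; simp [h] at hE
        · simpa using h
      have he2 : e = (pvYm ((pref.filter (fun x => pvGk x.1 == pvGk kv.1)).headD ([], 0)).1,
          ((pref.filter (fun x => pvGk x.1 == pvGk kv.1)).map Prod.snd).sum) := by
        unfold pvExp at hE
        simp only [hms, Bool.false_eq_true, if_false] at hE
        exact (Option.some_inj.mp hE).symm
      have hstep : pvStepA od (d, acc) kv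
          = (d.insert (pvGk kv.1) (e.1, e.2 + kv.2),
             acc ++ [-(PySem.Int.floordiv (-e.2) (pvMonthDiff e.1 (pvYm kv.1)))]) := by
        simp only [pvStepA]
        rw [hcv, hinv (pvGk kv.1), hE]
        rfl
      have hinv' : ∀ g, (d.insert (pvGk kv.1) (e.1, e.2 + kv.2)).get? g
          = pvExp (pref ++ [kv]) g := by
        intro g
        rw [PySem.Dict.get?_insert, pvExp_append]
        by_cases hg : g = pvGk kv.1
        · simp [hg, hE]
        · simp [hg, Ne.symm hg, hinv g]
      rw [hstep, ih (pref ++ [kv]) _ _ hlook' hinv']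
      have hout : pvEntryOut pref kv
          = -(PySem.Int.floordiv (-e.2) (pvMonthDiff e.1 (pvYm kv.1))) := by
        unfold pvEntryOut pvPrevs
        rw [he2]
        simp [hms]
      rw [show pvOuts pref (kv :: rest) = pvEntryOut pref kv :: pvOuts (pref ++ [kv]) rest
        from rfl, hout, List.append_assoc]
      rfl

lemma pvA_eq_outs (od : List (List Int × Int)) (hnd : (od.map Prod.fst).Nodup) :
    get_monthly_averages od = pvOuts [] od.reverse := by
  have hlook : ∀ kv ∈ od.reverse, (PySem.Dict.mk od).get? kv.1 = some kv.2 := by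
    intro kv hkv
    have hmem : (kv.1, kv.2) ∈ (PySem.Dict.mk od).items := by
      simpa using List.mem_reverse.mp hkv
    exact PySem.Dict.get?_of_mem_items _ hmem (by simpa [PySem.Dict.keys] using hnd)
  have hinv : ∀ g, (PySem.Dict.empty : PySem.Dict (Int × Int) ((Int × Int) × Int)).get? g
      = pvExp [] g := by
    intro g
    simp [PySem.Dict.get?_empty, pvExp]
  unfold get_monthly_averages
  rw [pvFoldA od od.reverse [] _ _ hlook hinv]
  simp

lemma pvFiltMap (l : List (List Int × Int)) (p : List Int × Int → Bool) (i : Nat)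
    (hi : i ≤ l.length) :
    ((List.range i).filter (fun j => p (l.getD j ([], 0)))).map (fun j => l.getD j ([], 0))
      = (l.take i).filter p := by
  induction i with
  | zero => simp
  | succ n ih =>
    rw [List.range_succ, List.filter_append, List.map_append,
        ih (by omega), List.take_add_one]
    have hn : n < l.length := by omega
    have hget : l.getD n ([], 0) = l[n] := by
      simp [List.getD, List.getElem?_eq_getElem hn]
    simp only [List.getElem?_eq_getElem hn, Option.toList_some, List.filter_append,
      List.filter_cons, List.filter_nil, hget]
    by_cases hp : p l[n]
    · simp [hp, List.getElem?_eq_getElem hn]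
    · simp [hp]

lemma pvEntryB_eq (pref rest : List (List Int × Int)) (kv : List Int × Int) :
    pvEntryB (pref ++ kv :: rest) pref.length = pvEntryOut pref kv := by
  have hkey : (pref ++ kv :: rest).getD pref.length ([], 0) = kv := by
    simp [List.getD]
  have hlen : pref.length ≤ (pref ++ kv :: rest).length := by simp
  have hmap : ((List.range pref.length).filter
        (fun j => pvGk ((pref ++ kv :: rest).getD j ([], 0)).1 == pvGk kv.1)).map
        (fun j => (pref ++ kv :: rest).getD j ([], 0))
      = ((pref ++ kv :: rest).take pref.length).filter (fun x => pvGk x.1 == pvGk kv.1) :=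
    pvFiltMap (pref ++ kv :: rest) (fun x => pvGk x.1 == pvGk kv.1) pref.length hlen
  rw [List.take_left] at hmap
  unfold pvEntryB pvEntryOut pvPrevs
  simp only [hkey]
  cases hprev : (List.range pref.length).filter
      (fun j => pvGk ((pref ++ kv :: rest).getD j ([], 0)).1 == pvGk kv.1) with
  | nil =>
    rw [hprev] at hmap
    simp only [List.map_nil] at hmap
    rw [← hmap]
    simp
  | cons a t =>
    rw [hprev] at hmap
    have hne : (pref.filter (fun x => pvGk x.1 == pvGk kv.1)).isEmpty = false := by
      rw [← hmap]; simp
    have hhead : (pref ++ kv :: rest).getD a ([], 0)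
        = (pref.filter (fun x => pvGk x.1 == pvGk kv.1)).headD ([], 0) := by
      rw [← hmap]; rfl
    have hsum : (a :: t).map (fun j => ((pref ++ kv :: rest).getD j ([], 0)).2)
        = (pref.filter (fun x => pvGk x.1 == pvGk kv.1)).map Prod.snd := by
      rw [← hmap, List.map_map]; rfl
    simp only [hne, List.isEmpty_cons, List.headD_cons, hhead, hsum, Bool.false_eq_true,
      if_false]

lemma pvMapB (rest pref : List (List Int × Int)) :
    (List.range rest.length).map (fun t => pvEntryB (pref ++ rest) (pref.length + t))
      = pvOuts pref rest := by
  induction rest generalizing pref with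
  | nil => simp [pvOuts]
  | cons kv rest' ih =>
    rw [List.length_cons, List.range_succ_eq_map, List.map_cons, List.map_map]
    show _ :: _ = pvEntryOut pref kv :: pvOuts (pref ++ [kv]) rest'
    congr 1
    · rw [Nat.add_zero]
      exact pvEntryB_eq pref rest' kv
    · have harg : (fun t => pvEntryB (pref ++ kv :: rest') (pref.length + t)) ∘ Nat.succ
          = fun t => pvEntryB ((pref ++ [kv]) ++ rest') ((pref ++ [kv]).length + t) := by
        funext u
        simp only [Function.comp_apply, List.append_assoc, List.singleton_append,
          List.length_append, List.length_cons, List.length_nil]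
        congr 1
        omega
      rw [harg]
      have h2 := ih (pref ++ [kv])
      rw [List.append_assoc] at h2
      simpa using h2

lemma pvB_eq_outs (od : List (List Int × Int)) :
    get_monthly_averages_alt od = pvOuts [] od.reverse := by
  have := pvMapB od.reverse []
  simp only [List.nil_append, List.length_nil, Nat.zero_add] at this
  exact this

-- ===== VERDICT (by name: the statement is the Claim_ definition above) =====
theorem get_monthly_averages_spec : Claim_equal_get_monthly_averages := by
  intro od _ hpre
  unfold Spec_get_monthly_averages
  rw [pvA_eq_outs od hpre.1, pvB_eq_outs od]
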